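-- pv_equiv track=rewrite | github.com/WandererGuy/TarGuess-I-main | GUESS/src/a_person_analyze.py | process_email
-- ===== SOURCE A (Python) =====
-- def process_email(email):
--     email_dict  = {}
--     pos = email.find('@')  # Assuming 'pos' is the position of '@'
--     if pos == -1:
--
--         return None  # Handle case where '@' is not found
--
--     email_prefix = email[:pos]
--     email_dict['E'] = email_prefix
--     digit_seq = ""
--     letter_seq = ""
--
--     # Extract first sequence of digits
--     for char in email_prefix:
--         if '0' <= char <= '9':
--             digit_seq += char
--         elif digit_seq:  # Break once the first sequence of digits is interrupted
--             break
--
--     # Reset and extract first sequence of letters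
--     for char in email_prefix:
--         if 'a' <= char <= 'z' or 'A' <= char <= 'Z':
--             letter_seq += char
--         elif letter_seq:  # Break once the first sequence of letters is interrupted
--             break
--     if digit_seq:
--         email_dict['s'] = digit_seq
--     else:
--         email_dict['s'] = ""
--     if letter_seq:
--         email_dict['t'] = letter_seq
--     else:
--         email_dict['t'] = ""
--
--     return email_dict
-- ===== SOURCE B (Python) =====
-- import re
--
--
-- def process_email(email):
--     pos = email.find('@')
--     if pos == -1:
--         return None
--     email_prefix = email[:pos]
--     m = re.search(r'[0-9]+', email_prefix)
--     n = re.search(r'[a-zA-Z]+', email_prefix)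
--     return {'E': email_prefix,
--             's': m.group() if m else '',
--             't': n.group() if n else ''}
-- ===== Notes on version B (the rewrite author's own statement) =====
-- stated objective: idiomatic
-- what changed: Replaces A's two accumulate-and-break character loops by direct first-match extraction with re.search for a digit run and for an ASCII-letter run (skip to the first match, take the maximal run).
import Mathlib
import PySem

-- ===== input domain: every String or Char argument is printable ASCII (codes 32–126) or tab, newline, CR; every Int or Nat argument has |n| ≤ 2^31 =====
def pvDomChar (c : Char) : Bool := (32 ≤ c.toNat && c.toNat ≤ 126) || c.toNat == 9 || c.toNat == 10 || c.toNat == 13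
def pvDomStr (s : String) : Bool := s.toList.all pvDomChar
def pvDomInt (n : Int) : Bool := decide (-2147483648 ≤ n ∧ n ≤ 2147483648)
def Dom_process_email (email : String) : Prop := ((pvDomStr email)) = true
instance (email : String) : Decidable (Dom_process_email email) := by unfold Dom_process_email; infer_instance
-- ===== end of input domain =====

-- B replaces A's two accumulate-and-break loops by regex-style first-match extraction
-- (find the first matching run directly); objective: more idiomatic, same results.

-- shared character classes ('0' <= c <= '9', letters), exactly A's code-point comparisons
def pvIsDigit (c : Char) : Bool := '0' ≤ c && c ≤ '9'
def pvIsLetter (c : Char) : Bool := ('a' ≤ c && c ≤ 'z') || ('A' ≤ c && c ≤ 'Z')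

-- ===== PORT A =====
-- A's loop: accumulate matching chars, break at the first non-match once the accumulator is non-empty
def pvRunLoopA (p : Char → Bool) : List Char → List Char → List Char
  | [], acc => acc
  | c :: cs, acc =>
    if p c then pvRunLoopA p cs (acc ++ [c])
    else if acc ≠ [] then acc
    else pvRunLoopA p cs acc

def process_email (email : String) : Option (List (String × String)) :=
  let pos := PySem.Str.find email "@"
  if pos = -1 then none
  else
    let email_prefix := PySem.Str.slice email none (some pos)
    let digit_seq := pvRunLoopA pvIsDigit email_prefix.toList []
    let letter_seq := pvRunLoopA pvIsLetter email_prefix.toList []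
    some [("E", email_prefix),
          ("s", if digit_seq ≠ [] then String.ofList digit_seq else ""),
          ("t", if letter_seq ≠ [] then String.ofList letter_seq else "")]

-- ===== PORT B =====
-- exact port of re.search(r'[0-9]+' / r'[a-zA-Z]+', s): the first maximal run of matching
-- characters (skip to the first match, take while it matches); [] iff there is no match,
-- which is Source B's "m.group() if m else ''"
def pvFirstRun (p : Char → Bool) (cs : List Char) : List Char :=
  (cs.dropWhile (fun c => !p c)).takeWhile p

def process_email_alt (email : String) : Option (List (String × String)) :=
  let pos := PySem.Str.find email "@"
  if pos = -1 then none
  else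
    let email_prefix := PySem.Str.slice email none (some pos)
    some [("E", email_prefix),
          ("s", String.ofList (pvFirstRun pvIsDigit email_prefix.toList)),
          ("t", String.ofList (pvFirstRun pvIsLetter email_prefix.toList))]

-- ===== PRECONDITION & SPEC =====
def Spec_process_email (email : String) (out : Option (List (String × String))) : Prop := out = process_email_alt email
instance (email : String) (out : Option (List (String × String))) : Decidable (Spec_process_email email out) := by unfold Spec_process_email; infer_instance

-- ===== CLAIM (what is proved, stated in full; the proofs are below) =====
def Claim_equal_process_email : Prop := ∀ (email : String), Dom_process_email email → Spec_process_email email (process_email email)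

-- ===== LEMMAS AND PROOFS =====

-- once the accumulator is non-empty, A's loop appends exactly the leading run and stops
theorem pvRunLoopA_ne_nil (p : Char → Bool) (l acc : List Char) (h : acc ≠ []) :
    pvRunLoopA p l acc = acc ++ l.takeWhile p := by
  induction l generalizing acc with
  | nil => simp [pvRunLoopA]
  | cons c cs ih =>
    by_cases hp : p c
    · simp [pvRunLoopA, hp, ih (acc ++ [c]) (by simp)]
    · simp [pvRunLoopA, hp, h, List.takeWhile]

-- A's loop from the empty accumulator computes the first maximal run (= B's pvFirstRun)
theorem pvRunLoopA_eq_firstRun (p : Char → Bool) (l : List Char) :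
    pvRunLoopA p l [] = pvFirstRun p l := by
  induction l with
  | nil => simp [pvRunLoopA, pvFirstRun]
  | cons c cs ih =>
    by_cases hp : p c
    · simp [pvRunLoopA, hp, pvFirstRun, List.dropWhile,
        pvRunLoopA_ne_nil p cs [c] (by simp)]
    · simpa [pvRunLoopA, hp, pvFirstRun, List.dropWhile] using ih

theorem mk_firstRun_if (p : Char → Bool) (l : List Char) :
    (if pvRunLoopA p l [] ≠ [] then String.ofList (pvRunLoopA p l []) else "") =
      String.ofList (pvFirstRun p l) := by
  rw [pvRunLoopA_eq_firstRun]
  by_cases h : pvFirstRun p l = [] <;> simp [h] <;> decide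

-- ===== VERDICT (by name: the statement is the Claim_ definition above) =====
theorem process_email_spec : Claim_equal_process_email := by
  intro email _
  unfold Spec_process_email
  simp only [process_email, process_email_alt, mk_firstRun_if]
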